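-- pv_equiv track=rewrite | github.com/keatonkraiger/Pressure_Video_Synching | post_processing/2_find_faulty_sensors.py | merge_faulty
-- ===== SOURCE A (Python) =====
-- def merge_faulty(existing, new):
--     """Merge two dicts of faulty sensors {left: [[y,x],...], right: [[y,x],...]}."""
--     merged = {}
--     for side in ["left", "right"]:
--         old = existing.get(side, [])
--         new_points = new.get(side, [])
--         all_pts = {tuple(pt) for pt in old} | {tuple(pt) for pt in new_points}
--         merged[side] = [list(pt) for pt in sorted(all_pts)]
--     return merged
-- ===== SOURCE B (Python) =====
-- def merge_faulty(existing, new):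
--     """Merge two dicts of faulty sensors {left: [[y,x],...], right: [[y,x],...]}.
--
--     Sort-then-adjacent-dedup instead of set-dedup-then-sort."""
--     merged = {}
--     for side in ["left", "right"]:
--         pts = [tuple(p) for p in existing.get(side, [])] + \
--               [tuple(p) for p in new.get(side, [])]
--         pts.sort()
--         out = []
--         prev = None
--         for p in pts:
--             if p != prev:
--                 out.append(list(p))
--                 prev = p
--         merged[side] = out
--     return merged
-- ===== Notes on version B (the rewrite author's own statement) =====
-- stated objective: alternative
-- what changed: Replaces A's set-union dedup followed by sorting with concatenating both sides' points, sorting once, and removing duplicates in a single adjacent-comparison pass over the sorted list.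
import Mathlib
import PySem

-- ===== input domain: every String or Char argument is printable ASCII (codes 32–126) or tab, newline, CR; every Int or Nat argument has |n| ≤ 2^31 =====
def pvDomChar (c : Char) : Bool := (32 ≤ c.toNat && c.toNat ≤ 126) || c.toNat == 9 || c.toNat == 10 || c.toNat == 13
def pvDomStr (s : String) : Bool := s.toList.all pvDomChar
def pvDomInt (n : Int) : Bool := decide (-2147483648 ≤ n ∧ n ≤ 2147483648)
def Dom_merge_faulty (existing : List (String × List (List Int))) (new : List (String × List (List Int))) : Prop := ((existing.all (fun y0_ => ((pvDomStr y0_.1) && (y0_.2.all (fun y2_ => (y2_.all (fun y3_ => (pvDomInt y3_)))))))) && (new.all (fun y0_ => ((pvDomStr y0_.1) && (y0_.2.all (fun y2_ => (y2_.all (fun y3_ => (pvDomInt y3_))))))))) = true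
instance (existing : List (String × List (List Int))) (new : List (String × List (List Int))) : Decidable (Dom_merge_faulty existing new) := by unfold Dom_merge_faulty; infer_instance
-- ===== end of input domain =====

-- B replaces A's set-union dedup + sort by a single sort of the concatenation followed by
-- one adjacent-duplicate-removal pass (an alternative decomposition, same asymptotic cost).

-- ===== PORT A =====
-- tuple(pt) / list(pt) are the identity on our List Int representation of a point.
def merge_faulty (existing : List (String × List (List Int))) (new : List (String × List (List Int))) : List (String × List (List Int)) :=
  ((["left", "right"]).foldl (fun (merged : PySem.Dict String (List (List Int))) side =>
    let old := PySem.Dict.getD (PySem.Dict.mk existing) side []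
    let new_points := PySem.Dict.getD (PySem.Dict.mk new) side []
    let all_pts := PySem.Set.union (PySem.Set.ofList (old.map (fun pt => pt)))
                     (PySem.Set.ofList (new_points.map (fun pt => pt)))
    PySem.Dict.insert merged side
      ((PySem.List.sorted all_pts (fun x => x)).map (fun pt => pt)))
    PySem.Dict.empty).items

-- ===== PORT B =====
def merge_faulty_alt (existing : List (String × List (List Int))) (new : List (String × List (List Int))) : List (String × List (List Int)) :=
  ((["left", "right"]).foldl (fun (merged : PySem.Dict String (List (List Int))) side =>
    let pts := (PySem.Dict.getD (PySem.Dict.mk existing) side []).map (fun p => p) ++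
               (PySem.Dict.getD (PySem.Dict.mk new) side []).map (fun p => p)
    let pts := PySem.List.sorted pts (fun x => x)
    -- out = []; prev = None; for p in pts: if p != prev: out.append(list(p)); prev = p
    let st := pts.foldl
      (fun (st : List (List Int) × Option (List Int)) p =>
        if some p ≠ st.2 then (st.1 ++ [p], some p) else st)
      ([], none)
    PySem.Dict.insert merged side st.1)
    PySem.Dict.empty).items

-- ===== PRECONDITION & SPEC =====
def Spec_merge_faulty (existing : List (String × List (List Int))) (new : List (String × List (List Int))) (out : List (String × List (List Int))) : Prop := out = merge_faulty_alt existing new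
instance (existing : List (String × List (List Int))) (new : List (String × List (List Int))) (out : List (String × List (List Int))) : Decidable (Spec_merge_faulty existing new out) := by unfold Spec_merge_faulty; infer_instance

-- ===== CLAIM (what is proved, stated in full; the proofs are below) =====
def Claim_equal_merge_faulty : Prop := ∀ (existing : List (String × List (List Int))) (new : List (String × List (List Int))), Dom_merge_faulty existing new → Spec_merge_faulty existing new (merge_faulty existing new)

-- ===== LEMMAS AND PROOFS =====

-- A pure recursive form of B's adjacent-dedup loop.
def pvDD : List (List Int) → Option (List Int) → List (List Int)
  | [], _ => []
  | p :: t, prev => if some p ≠ prev then p :: pvDD t (some p) else pvDD t prev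

theorem pvFold_eq_dd (s : List (List Int)) (out : List (List Int)) (prev : Option (List Int)) :
    (s.foldl (fun (st : List (List Int) × Option (List Int)) p =>
        if some p ≠ st.2 then (st.1 ++ [p], some p) else st) (out, prev)).1
      = out ++ pvDD s prev := by
  induction s generalizing out prev with
  | nil => simp [pvDD]
  | cons p t ih =>
    rw [List.foldl_cons, pvDD]
    by_cases h : some p = prev
    · rw [if_neg (by simp [h]), if_neg (by simp [h]), ih]
    · rw [if_pos (by simp [h]), if_pos (by simp [h]), ih, List.append_assoc]
      rfl

theorem pvDD_some (s : List (List Int)) :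
    ∀ q : List Int, s.Pairwise (· ≤ ·) → (∀ p ∈ s, q ≤ p) →
      (pvDD s (some q)).Pairwise (· < ·) ∧ (∀ x, x ∈ pvDD s (some q) ↔ x ∈ s ∧ x ≠ q) := by
  induction s with
  | nil => intro q _ _; simp [pvDD]
  | cons p t ih =>
    intro q hs hq
    have hpt : ∀ r ∈ t, p ≤ r := (List.pairwise_cons.mp hs).1
    have hts : t.Pairwise (· ≤ ·) := (List.pairwise_cons.mp hs).2
    by_cases h : p = q
    · subst h
      have hih := ih p hts hpt
      rw [pvDD, if_neg (by simp)]
      refine ⟨hih.1, fun x => ?_⟩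
      rw [hih.2 x]
      constructor
      · rintro ⟨hx, hne⟩; exact ⟨List.mem_cons_of_mem _ hx, hne⟩
      · rintro ⟨hx, hne⟩
        rcases List.mem_cons.mp hx with hx | hx
        · exact absurd hx hne
        · exact ⟨hx, hne⟩
    · have hih := ih p hts hpt
      rw [pvDD, if_pos (by simp [h])]
      constructor
      · refine List.pairwise_cons.mpr ⟨fun x hx => ?_, hih.1⟩
        have hx' := (hih.2 x).mp hx
        exact lt_of_le_of_ne (hpt x hx'.1) (Ne.symm hx'.2)
      · intro x
        rw [List.mem_cons, List.mem_cons, hih.2 x]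
        constructor
        · rintro (rfl | ⟨hx, hne⟩)
          · exact ⟨Or.inl rfl, h⟩
          · refine ⟨Or.inr hx, fun hxq => ?_⟩
            subst hxq
            exact h (le_antisymm (hpt x hx) (hq p (List.mem_cons_self)))
        · rintro ⟨rfl | hx, hne⟩
          · exact Or.inl rfl
          · by_cases hxp : x = p
            · exact Or.inl hxp
            · exact Or.inr ⟨hx, hxp⟩

theorem pvDD_none (s : List (List Int)) (hs : s.Pairwise (· ≤ ·)) :
    (pvDD s none).Pairwise (· < ·) ∧ (∀ x, x ∈ pvDD s none ↔ x ∈ s) := by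
  cases s with
  | nil => simp [pvDD]
  | cons p t =>
    have hpt : ∀ r ∈ t, p ≤ r := (List.pairwise_cons.mp hs).1
    have hts : t.Pairwise (· ≤ ·) := (List.pairwise_cons.mp hs).2
    have h := pvDD_some t p hts hpt
    rw [pvDD, if_pos (by simp)]
    constructor
    · refine List.pairwise_cons.mpr ⟨fun x hx => ?_, h.1⟩
      have hx' := (h.2 x).mp hx
      exact lt_of_le_of_ne (hpt x hx'.1) (Ne.symm hx'.2)
    · intro x
      rw [List.mem_cons, List.mem_cons, h.2 x]
      constructor
      · rintro (rfl | ⟨hx, _⟩)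
        · exact Or.inl rfl
        · exact Or.inr hx
      · rintro (rfl | hx)
        · exact Or.inl rfl
        · by_cases hxp : x = p
          · exact Or.inl hxp
          · exact Or.inr ⟨hx, hxp⟩

-- The two DecidableLT instances on List Int give the same sort (they are definitionally equal).
theorem pvSorted_irrel (xs : List (List Int)) :
    @PySem.List.sorted (List Int) (List Int) List.instLT (fun a b => a.decidableLT b) xs (fun x => x) false
    = @PySem.List.sorted (List Int) (List Int) List.instLinearOrder.toLT LinearOrder.toDecidableLT xs (fun x => x) false := by
  congr 1

-- Per-side equality: A's sorted set-union equals B's sort + adjacent dedup.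
theorem pvSide_eq' (xs ys : List (List Int)) :
    @PySem.List.sorted (List Int) (List Int) List.instLinearOrder.toLT LinearOrder.toDecidableLT
        (PySem.Set.union (PySem.Set.ofList xs) (PySem.Set.ofList ys)) (fun x => x) false
      = pvDD (@PySem.List.sorted (List Int) (List Int) List.instLinearOrder.toLT LinearOrder.toDecidableLT
          (xs ++ ys) (fun x => x) false) none := by
  generalize hSdef : @PySem.List.sorted (List Int) (List Int) List.instLinearOrder.toLT
      LinearOrder.toDecidableLT (xs ++ ys) (fun x => x) false = S
  have hs : S.Pairwise (· ≤ ·) := hSdef ▸ PySem.List.sorted_pairwise (xs ++ ys) (fun x => x)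
  have hSperm : S.Perm (xs ++ ys) := by
    rw [← hSdef, ← pvSorted_irrel]; exact PySem.List.sorted_perm (xs ++ ys) (fun x => x) false
  have hdd := pvDD_none S hs
  have hnd : (pvDD S none).Nodup := hdd.1.imp (fun h => ne_of_lt h)
  have hund := PySem.Set.nodup_union (PySem.Set.ofList xs) (PySem.Set.ofList ys) (PySem.Set.nodup_ofList xs)
  have hperm : (pvDD S none).Perm (PySem.Set.union (PySem.Set.ofList xs) (PySem.Set.ofList ys)) := by
    refine (List.perm_ext_iff_of_nodup hnd hund).mpr fun a => ?_
    rw [hdd.2 a, PySem.Set.mem_union, PySem.Set.mem_ofList, PySem.Set.mem_ofList, ← List.mem_append]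
    exact hSperm.mem_iff
  exact PySem.List.sorted_eq_of_perm_of_pairwise_lt _ _ _ hperm hdd.1

theorem pvSide_eq (xs ys : List (List Int)) :
    PySem.List.sorted (PySem.Set.union (PySem.Set.ofList xs) (PySem.Set.ofList ys)) (fun x => x)
      = pvDD (PySem.List.sorted (xs ++ ys) (fun x => x)) none := by
  rw [pvSorted_irrel, pvSorted_irrel]
  exact pvSide_eq' xs ys

-- ===== VERDICT (by name: the statement is the Claim_ definition above) =====
theorem merge_faulty_spec : Claim_equal_merge_faulty := by
  intro existing new _
  unfold Spec_merge_faulty merge_faulty merge_faulty_alt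
  simp only [List.foldl, List.map_id']
  congr 2
  · rw [pvFold_eq_dd, List.nil_append, ← pvSide_eq]
  · rw [pvFold_eq_dd, List.nil_append, ← pvSide_eq]
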